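-- pv_equiv track=rewrite | github.com/pusulamkendim/flywire-neuro | fly-brain-embodied/visual_system.py | _map_ommatidia
-- ===== SOURCE A (Python) =====
-- NUM_OMMATIDIA = 721  # per eye in flygym
--
-- def _map_ommatidia(neuron_ids):
--     """Map 721 ommatidia to groups of neuron IDs (sorted, evenly distributed)."""
--     if not neuron_ids:
--         return {}
--     n = len(neuron_ids)
--     sorted_ids = sorted(neuron_ids)
--     omm_map = {}
--     for omm_idx in range(NUM_OMMATIDIA):
--         start = (omm_idx * n) // NUM_OMMATIDIA
--         end = ((omm_idx + 1) * n) // NUM_OMMATIDIA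
--         if start < end:
--             omm_map[omm_idx] = sorted_ids[start:end]
--     return omm_map
-- ===== SOURCE B (Python) =====
-- NUM_OMMATIDIA = 721  # per eye in flygym
--
-- def _map_ommatidia(neuron_ids):
--     """Map 721 ommatidia to groups of neuron IDs (sorted, evenly distributed)."""
--     if not neuron_ids:
--         return {}
--     n = len(neuron_ids)
--     omm_map = {}
--     for i, nid in enumerate(sorted(neuron_ids)):
--         bucket = (i * NUM_OMMATIDIA + NUM_OMMATIDIA - 1) // n
--         omm_map.setdefault(bucket, []).append(nid)
--     return omm_map
-- ===== Notes on version B (the rewrite author's own statement) =====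
-- stated objective: alternative
-- what changed: Replaces A's loop over the 721 buckets with per-bucket slicing of the sorted list by a single pass over enumerate(sorted_ids) that assigns each element to its bucket via the inverse index formula (i*721+720)//n and appends with setdefault.
import Mathlib
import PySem

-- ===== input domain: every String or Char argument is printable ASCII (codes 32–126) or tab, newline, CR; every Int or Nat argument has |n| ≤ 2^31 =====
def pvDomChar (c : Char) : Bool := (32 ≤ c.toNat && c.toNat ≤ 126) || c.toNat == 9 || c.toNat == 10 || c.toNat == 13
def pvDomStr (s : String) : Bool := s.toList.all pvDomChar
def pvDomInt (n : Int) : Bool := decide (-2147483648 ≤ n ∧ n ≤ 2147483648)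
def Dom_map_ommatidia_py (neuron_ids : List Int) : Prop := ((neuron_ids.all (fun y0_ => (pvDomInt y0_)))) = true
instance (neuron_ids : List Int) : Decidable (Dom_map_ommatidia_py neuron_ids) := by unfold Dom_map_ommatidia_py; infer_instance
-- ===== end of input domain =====

-- B replaces A's loop over the 721 buckets with one pass over the enumerated sorted ids,
-- assigning each element to its bucket by the inverse index formula (same values, same key order).

def pvNUM_OMMATIDIA : Int := 721  -- module constant NUM_OMMATIDIA, shared by both ports

-- ===== PORT A =====
def map_ommatidia_py (neuron_ids : List Int) : List (Int × List Int) :=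
  if neuron_ids = [] then []
  else
    let n : Int := (neuron_ids.length : Int)
    let sorted_ids := PySem.List.sorted neuron_ids id
    let omm_map := (PySem.List.pyRange 0 pvNUM_OMMATIDIA).foldl
      (fun d omm_idx =>
        let start := PySem.Int.floordiv (omm_idx * n) pvNUM_OMMATIDIA
        let stop := PySem.Int.floordiv ((omm_idx + 1) * n) pvNUM_OMMATIDIA
        if start < stop then
          d.insert omm_idx (PySem.List.slice sorted_ids (some start) (some stop))
        else d)
      (PySem.Dict.empty : PySem.Dict Int (List Int))
    omm_map.items

-- ===== PORT B =====
def map_ommatidia_py_alt (neuron_ids : List Int) : List (Int × List Int) :=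
  if neuron_ids = [] then []
  else
    let n : Int := (neuron_ids.length : Int)
    let omm_map := (PySem.List.enumerate (PySem.List.sorted neuron_ids id)).foldl
      (fun d p =>
        let bucket := PySem.Int.floordiv (p.1 * pvNUM_OMMATIDIA + pvNUM_OMMATIDIA - 1) n
        d.modify bucket [] (fun l => l ++ [p.2]))   -- setdefault(bucket, []).append(nid)
      (PySem.Dict.empty : PySem.Dict Int (List Int))
    omm_map.items

-- ===== PRECONDITION & SPEC =====
def Spec_map_ommatidia_py (neuron_ids : List Int) (out : List (Int × List Int)) : Prop := out = map_ommatidia_py_alt neuron_ids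
instance (neuron_ids : List Int) (out : List (Int × List Int)) : Decidable (Spec_map_ommatidia_py neuron_ids out) := by unfold Spec_map_ommatidia_py; infer_instance

-- ===== CLAIM (what is proved, stated in full; the proofs are below) =====
def Claim_equal_map_ommatidia_py : Prop := ∀ (neuron_ids : List Int), Dom_map_ommatidia_py neuron_ids → Spec_map_ommatidia_py neuron_ids (map_ommatidia_py neuron_ids)

-- ===== LEMMAS AND PROOFS =====

-- A's loop body / B's loop body, as named functions (definitionally equal to the lambdas in the ports)
def pvAstep (n : Int) (s : List Int) : PySem.Dict Int (List Int) → Int → PySem.Dict Int (List Int) :=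
  fun d omm_idx =>
    let start := PySem.Int.floordiv (omm_idx * n) pvNUM_OMMATIDIA
    let stop := PySem.Int.floordiv ((omm_idx + 1) * n) pvNUM_OMMATIDIA
    if start < stop then
      d.insert omm_idx (PySem.List.slice s (some start) (some stop))
    else d

def pvBstep (n : Int) : PySem.Dict Int (List Int) → (Int × Int) → PySem.Dict Int (List Int) :=
  fun d p =>
    let bucket := PySem.Int.floordiv (p.1 * pvNUM_OMMATIDIA + pvNUM_OMMATIDIA - 1) n
    d.modify bucket [] (fun l => l ++ [p.2])

def pvStartN (n j : Nat) : Nat := j * n / 721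

def pvBlock (s : List Int) (n j : Nat) : List Int :=
  (s.drop (pvStartN n j)).take (pvStartN n (j+1) - pvStartN n j)


theorem pvStart_mono (n j : Nat) : pvStartN n j ≤ pvStartN n (j+1) := by
  unfold pvStartN
  exact Nat.div_le_div_right (Nat.mul_le_mul_right n (Nat.le_succ j))

theorem pvStart_le (n j : Nat) (h : j ≤ 721) : pvStartN n j ≤ n := by
  unfold pvStartN
  calc j * n / 721 ≤ 721 * n / 721 := Nat.div_le_div_right (Nat.mul_le_mul_right n h)
    _ = n := Nat.mul_div_cancel_left n (by norm_num)

theorem pvStart_721 (n : Nat) : pvStartN n 721 = n := by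
  unfold pvStartN; exact Nat.mul_div_cancel_left n (by norm_num)

theorem pvDropSplit (s : List Int) (a b : Nat) (hab : a ≤ b) :
    s.drop a = (s.drop a).take (b - a) ++ s.drop b := by
  conv_lhs => rw [← List.take_append_drop (b - a) (s.drop a)]
  rw [List.drop_drop]
  congr 2
  omega

theorem pvBlockLen (s : List Int) (n j : Nat) (hns : s.length = n)
    (hbn : pvStartN n (j+1) ≤ n) :
    (pvBlock s n j).length = pvStartN n (j+1) - pvStartN n j := by
  have hab := pvStart_mono n j
  simp only [pvBlock, List.length_take, List.length_drop, hns]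
  omega

theorem pvContains_false (L : List (Int × List Int)) (j : Int)
    (h : ∀ p ∈ L, p.1 ≠ j) : (PySem.Dict.mk L).contains j = false := by
  simp [PySem.Dict.contains, List.any_eq_false]
  intro a b hab
  simpa using h (a, b) hab

theorem pvInsert_fresh (L : List (Int × List Int)) (j : Int) (v : List Int)
    (h : ∀ p ∈ L, p.1 ≠ j) :
    (PySem.Dict.mk L).insert j v = PySem.Dict.mk (L ++ [(j, v)]) := by
  simp [PySem.Dict.insert, pvContains_false L j h]

theorem pvGetD_absent (L : List (Int × List Int)) (j : Int) (dflt : List Int)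
    (h : ∀ p ∈ L, p.1 ≠ j) : (PySem.Dict.mk L).getD j dflt = dflt := by
  simp [PySem.Dict.getD, PySem.Dict.get?]
  rw [List.find?_eq_none.mpr]
  · rfl
  · intro p hp; simpa using h p hp

theorem pvGetD_last (L : List (Int × List Int)) (j : Int) (v dflt : List Int)
    (h : ∀ p ∈ L, p.1 ≠ j) : (PySem.Dict.mk (L ++ [(j, v)])).getD j dflt = v := by
  simp [PySem.Dict.getD, PySem.Dict.get?, List.find?_append]
  rw [List.find?_eq_none.mpr (by intro p hp; simpa using h p hp)]
  simp

theorem pvInsert_last (L : List (Int × List Int)) (j : Int) (v w : List Int)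
    (h : ∀ p ∈ L, p.1 ≠ j) :
    (PySem.Dict.mk (L ++ [(j, v)])).insert j w = PySem.Dict.mk (L ++ [(j, w)]) := by
  have hc : (PySem.Dict.mk (L ++ [(j, v)])).contains j = true := by
    simp [PySem.Dict.contains]
  simp only [PySem.Dict.insert, hc, if_pos]
  congr 1
  simp only [List.map_append]
  congr 1
  · have : L.map (fun p => if p.1 == j then (j, w) else p) = L.map id :=
      List.map_congr_left (fun p hp => by simp [h p hp])
    rw [this, List.map_id]
  · simp

theorem pvBucket_eq (n j t : Nat) (_hn : 0 < n) (h1 : pvStartN n j ≤ t)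
    (h2 : t < pvStartN n (j+1)) :
    PySem.Int.floordiv ((t : Int) * 721 + 721 - 1) (n : Int) = (j : Int) := by
  have hcast : ((t : Int) * 721 + 721 - 1) = ((t * 721 + 720 : Nat) : Int) := by push_cast; ring
  rw [hcast, PySem.Int.floordiv_natCast]
  apply Int.natCast_inj.mpr
  unfold pvStartN at h1 h2
  have hlo : j * n ≤ t * 721 + 720 := by
    have := (Nat.div_lt_iff_lt_mul (by norm_num : 0 < 721)).mp (Nat.lt_succ_of_le h1)
    omega
  have hhi : t * 721 + 720 < (j + 1) * n := by
    have := (Nat.le_div_iff_mul_le (by norm_num : 0 < 721)).mp (Nat.succ_le_of_lt h2)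
    omega
  exact Nat.div_eq_of_lt_le hlo (by simpa using hhi)

theorem pvChainAux (n j : Int) (l : List Int) :
    ∀ (i0 : Int) (L : List (Int × List Int)) (v : List Int),
    (∀ t : Nat, t < l.length → PySem.Int.floordiv ((i0 + t) * 721 + 721 - 1) n = j) →
    (∀ p ∈ L, p.1 ≠ j) →
    (PySem.List.enumerate l i0).foldl (pvBstep n) (PySem.Dict.mk (L ++ [(j, v)])) =
      PySem.Dict.mk (L ++ [(j, v ++ l)]) := by
  induction l with
  | nil => intro i0 L v _ _; simp [PySem.List.enumerate_nil]
  | cons x l ih =>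
    intro i0 L v hbuck hfresh
    rw [PySem.List.enumerate_cons, List.foldl_cons]
    have hb0 : PySem.Int.floordiv (i0 * 721 + 721 - 1) n = j := by
      have := hbuck 0 (by simp)
      simpa using this
    have hstep : pvBstep n (PySem.Dict.mk (L ++ [(j, v)])) (i0, x) =
        PySem.Dict.mk (L ++ [(j, v ++ [x])]) := by
      show (PySem.Dict.mk (L ++ [(j, v)])).modify
        (PySem.Int.floordiv (i0 * pvNUM_OMMATIDIA + pvNUM_OMMATIDIA - 1) n) [] (fun l => l ++ [x]) =
        PySem.Dict.mk (L ++ [(j, v ++ [x])])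
      have : (i0 * pvNUM_OMMATIDIA + pvNUM_OMMATIDIA - 1) = (i0 * 721 + 721 - 1) := by
        simp [pvNUM_OMMATIDIA]
      rw [this, PySem.Dict.modify, hb0, pvGetD_last L j v [] hfresh,
        pvInsert_last L j v _ hfresh]
    rw [hstep, ih (i0 + 1) L (v ++ [x])
      (by intro t ht
          have := hbuck (t + 1) (by simpa using Nat.succ_lt_succ ht)
          have harg : i0 + 1 + (t : Int) = i0 + ((t : Nat) + 1 : Nat) := by push_cast; ring
          rw [harg]; exact this)
      hfresh]
    simp

theorem pvChain (n j : Int) (l : List Int) (i0 : Int) (L : List (Int × List Int))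
    (hbuck : ∀ t : Nat, t < l.length → PySem.Int.floordiv ((i0 + t) * 721 + 721 - 1) n = j)
    (hfresh : ∀ p ∈ L, p.1 ≠ j) (hne : l ≠ []) :
    (PySem.List.enumerate l i0).foldl (pvBstep n) (PySem.Dict.mk L) =
      PySem.Dict.mk (L ++ [(j, l)]) := by
  cases l with
  | nil => exact absurd rfl hne
  | cons x l =>
    rw [PySem.List.enumerate_cons, List.foldl_cons]
    have hb0 : PySem.Int.floordiv (i0 * 721 + 721 - 1) n = j := by
      have := hbuck 0 (by simp); simpa using this
    have hstep : pvBstep n (PySem.Dict.mk L) (i0, x) = PySem.Dict.mk (L ++ [(j, [x])]) := by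
      show (PySem.Dict.mk L).modify
        (PySem.Int.floordiv (i0 * pvNUM_OMMATIDIA + pvNUM_OMMATIDIA - 1) n) [] (fun l => l ++ [x]) =
        PySem.Dict.mk (L ++ [(j, [x])])
      have : (i0 * pvNUM_OMMATIDIA + pvNUM_OMMATIDIA - 1) = (i0 * 721 + 721 - 1) := by
        simp [pvNUM_OMMATIDIA]
      rw [this, PySem.Dict.modify, hb0, pvGetD_absent L j [] hfresh]
      simpa using pvInsert_fresh L j [x] hfresh
    rw [hstep, pvChainAux n j l (i0 + 1) L [x]
      (by intro t ht
          have := hbuck (t + 1) (by simpa using Nat.succ_lt_succ ht)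
          have harg : i0 + 1 + (t : Int) = i0 + ((t : Nat) + 1 : Nat) := by push_cast; ring
          rw [harg]; exact this)
      hfresh]
    simp

theorem pvMainAux (s : List Int) (n : Nat) (hns : s.length = n) (hn : 0 < n) :
    ∀ (m j : Nat), j + m = 721 →
    ∀ (L : List (Int × List Int)),
    (∀ p ∈ L, ∀ j' : Nat, j ≤ j' → p.1 ≠ (j' : Int)) →
    (PySem.List.pyRange (j : Int) 721).foldl (pvAstep (n : Int) s) (PySem.Dict.mk L) =
      (PySem.List.enumerate (s.drop (pvStartN n j)) ((pvStartN n j : Nat) : Int)).foldl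
        (pvBstep (n : Int)) (PySem.Dict.mk L) := by
  intro m
  induction m with
  | zero =>
    intro j hj L hL
    have hj' : j = 721 := by omega
    subst hj'
    rw [PySem.List.pyRange_one_eq_nil (by norm_num), pvStart_721, ← hns,
      List.drop_length, PySem.List.enumerate_nil]
    simp
  | succ m ih =>
    intro j hj L hL
    have hjlt : j < 721 := by omega
    rw [PySem.List.pyRange_one_cons (by exact_mod_cast hjlt), List.foldl_cons]
    have hcast1 : ((j : Int) + 1) = ((j + 1 : Nat) : Int) := by push_cast; ring
    set a := pvStartN n j with ha
    set b := pvStartN n (j + 1) with hb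
    have hab : a ≤ b := pvStart_mono n j
    have hbn : b ≤ n := pvStart_le n (j + 1) (by omega)
    have hstart : PySem.Int.floordiv ((j : Int) * (n : Int)) pvNUM_OMMATIDIA = (a : Int) := by
      rw [show ((j : Int) * (n : Int)) = ((j * n : Nat) : Int) by push_cast; ring,
        show (pvNUM_OMMATIDIA : Int) = ((721 : Nat) : Int) by norm_num [pvNUM_OMMATIDIA],
        PySem.Int.floordiv_natCast]
      simp [ha, pvStartN]
    have hstop : PySem.Int.floordiv (((j : Int) + 1) * (n : Int)) pvNUM_OMMATIDIA = (b : Int) := by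
      rw [show (((j : Int) + 1) * (n : Int)) = (((j + 1) * n : Nat) : Int) by push_cast; ring,
        show (pvNUM_OMMATIDIA : Int) = ((721 : Nat) : Int) by norm_num [pvNUM_OMMATIDIA],
        PySem.Int.floordiv_natCast]
      simp [hb, pvStartN]
    have hAstep : pvAstep (n : Int) s (PySem.Dict.mk L) (j : Int) =
        if a < b then (PySem.Dict.mk L).insert (j : Int) (pvBlock s n j) else PySem.Dict.mk L := by
      simp only [pvAstep, hstart, hstop]
      by_cases hlt : a < b
      · rw [if_pos (by exact_mod_cast hlt), if_pos hlt,
          PySem.List.slice_natCast, pvBlock]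
      · rw [if_neg (by exact_mod_cast hlt), if_neg hlt]
    by_cases hlt : a < b
    · -- block nonempty
      have hfresh : ∀ p ∈ L, p.1 ≠ (j : Int) := fun p hp => hL p hp j le_rfl
      have hblen : (pvBlock s n j).length = b - a := pvBlockLen s n j hns hbn
      have hsplit : s.drop a = pvBlock s n j ++ s.drop b := by
        rw [pvBlock, ← ha, ← hb]; exact pvDropSplit s a b hab
      rw [hAstep, if_pos hlt, pvInsert_fresh L _ _ hfresh, hsplit,
        PySem.List.enumerate_append, List.foldl_append,
        pvChain (n : Int) (j : Int) (pvBlock s n j) (a : Int) L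
          (by intro t ht
              rw [hblen] at ht
              rw [show ((a : Int) + (t : Nat)) = ((a + t : Nat) : Int) by push_cast; ring]
              exact pvBucket_eq n j (a + t) hn (by omega) (by omega))
          hfresh
          (by intro hnil; rw [hnil] at hblen; simp at hblen; omega),
        hblen,
        show ((a : Int) + ((b - a : Nat) : Int)) = ((b : Nat) : Int) by omega,
        hcast1]
      exact ih (j + 1) (by omega) (L ++ [((j : Int), pvBlock s n j)])
        (by intro p hp j' hj'
            rcases List.mem_append.mp hp with h | h
            · exact hL p h j' (by omega)
            · simp only [List.mem_singleton] at h
              subst h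
              simp only [ne_eq]
              intro hc
              have : j = j' := by exact_mod_cast hc
              omega)
    · -- empty block: a = b, dict unchanged
      have hae : a = b := by omega
      rw [hAstep, if_neg hlt, hcast1]
      have := ih (j + 1) (by omega) L
        (fun p hp j' hj' => hL p hp j' (by omega))
      rw [← hb, ← hae] at this
      exact this

-- ===== VERDICT (by name: the statement is the Claim_ definition above) =====
theorem map_ommatidia_py_spec : Claim_equal_map_ommatidia_py := by
  intro neuron_ids _
  unfold Spec_map_ommatidia_py map_ommatidia_py map_ommatidia_py_alt
  by_cases h : neuron_ids = []
  · simp [h]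
  · rw [if_neg h, if_neg h]
    have hn : 0 < neuron_ids.length := List.length_pos_iff.mpr h
    have hlen : (PySem.List.sorted neuron_ids id).length = neuron_ids.length :=
      PySem.List.length_sorted neuron_ids id false
    show ((PySem.List.pyRange 0 pvNUM_OMMATIDIA).foldl
        (pvAstep (neuron_ids.length : Int) (PySem.List.sorted neuron_ids id))
        (PySem.Dict.mk [])).items =
      ((PySem.List.enumerate (PySem.List.sorted neuron_ids id)).foldl
        (pvBstep (neuron_ids.length : Int)) (PySem.Dict.mk [])).items
    have hz : pvStartN neuron_ids.length 0 = 0 := by simp [pvStartN]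
    have key := pvMainAux (PySem.List.sorted neuron_ids id) neuron_ids.length hlen hn
      721 0 (by norm_num) [] (by simp)
    rw [hz] at key
    simp only [Nat.cast_zero, List.drop_zero] at key
    rw [show (pvNUM_OMMATIDIA : Int) = 721 from rfl]
    exact congrArg PySem.Dict.items key
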